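-- pv_equiv track=rewrite | github.com/numba/numba | llvm_cbuilder/tests/test_loopcontrol.py | loopbreak
-- ===== SOURCE A (Python) =====
-- def loopbreak(d):
--     z = 0
--     for x in range(100):
--         for y in range(100):
--             z += x + y
--             if z > 50:
--                 break
--         z -= d
--     return z
-- ===== SOURCE B (Python) =====
-- def loopbreak(d):
--     z = 0
--     for x in range(100):
--         full = 100 * x + 4950  # sum of x+y over y in 0..99
--         if z + full > 50:
--             # binary search for the smallest k in [0, 99] with
--             # z + (k+1)*x + k*(k+1)//2 > 50 (partial sum through y = k,
--             # including the term that triggers the break)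
--             lo, hi = 0, 99
--             while lo < hi:
--                 mid = (lo + hi) // 2
--                 if z + (mid + 1) * x + mid * (mid + 1) // 2 > 50:
--                     hi = mid
--                 else:
--                     lo = mid + 1
--             z += (lo + 1) * x + lo * (lo + 1) // 2
--         else:
--             z += full
--         z -= d
--     return z
-- ===== Notes on version B (the rewrite author's own statement) =====
-- stated objective: alternative
-- what changed: The inner linear loop-with-break over y is replaced by a branch on the full inner sum plus a binary search for the smallest break index, whose triangular partial sum is then added in one closed-form step.
import Mathlib
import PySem

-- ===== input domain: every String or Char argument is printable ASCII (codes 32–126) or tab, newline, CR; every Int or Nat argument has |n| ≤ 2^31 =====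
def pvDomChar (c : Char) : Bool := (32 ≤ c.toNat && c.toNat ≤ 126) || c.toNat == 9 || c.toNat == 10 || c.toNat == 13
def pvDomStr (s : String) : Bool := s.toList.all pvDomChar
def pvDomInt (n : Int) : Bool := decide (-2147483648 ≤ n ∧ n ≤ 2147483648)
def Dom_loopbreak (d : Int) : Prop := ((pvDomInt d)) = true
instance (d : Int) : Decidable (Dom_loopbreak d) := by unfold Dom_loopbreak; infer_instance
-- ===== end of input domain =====

-- B replaces A's linear inner break loop by a binary search for the break point
-- over the monotone partial sums (objective: alternative/simpler inner step).

-- ===== PORT A =====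
-- inner 'for y in range(100): z += x + y; if z > 50: break'
def loopbreakInner (x : Int) : List Int → Int → Int
  | [], z => z
  | y :: ys, z =>
    let z' := z + x + y
    if z' > 50 then z' else loopbreakInner x ys z'

def loopbreak (d : Int) : Int :=
  (PySem.List.pyRange 0 100 1).foldl
    (fun z x => loopbreakInner x (PySem.List.pyRange 0 100 1) z - d) 0

-- ===== PORT B =====
-- 'while lo < hi: mid = (lo+hi)//2; …' of Source B (lo, hi stay in 0..99, so Nat)
def altSearch (z x : Int) (lo hi : Nat) : Nat :=
  if h : lo < hi then
    let mid := (lo + hi) / 2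
    if z + ((mid : Int) + 1) * x + PySem.Int.floordiv ((mid : Int) * ((mid : Int) + 1)) 2 > 50 then
      altSearch z x lo mid
    else
      altSearch z x (mid + 1) hi
  else lo
termination_by hi - lo
decreasing_by
  all_goals omega

def loopbreak_alt (d : Int) : Int :=
  (PySem.List.pyRange 0 100 1).foldl
    (fun z x =>
      let full := 100 * x + 4950
      (if z + full > 50 then
        let k : Int := (altSearch z x 0 99 : Nat)
        z + (k + 1) * x + PySem.Int.floordiv (k * (k + 1)) 2
      else z + full) - d) 0

-- ===== PRECONDITION & SPEC =====
def Spec_loopbreak (d : Int) (out : Int) : Prop := out = loopbreak_alt d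
instance (d : Int) (out : Int) : Decidable (Spec_loopbreak d out) := by unfold Spec_loopbreak; infer_instance

-- ===== CLAIM (what is proved, stated in full; the proofs are below) =====
def Claim_equal_loopbreak : Prop := ∀ (d : Int), Dom_loopbreak d → Spec_loopbreak d (loopbreak d)

-- ===== LEMMAS AND PROOFS =====

-- partial sum of the inner-loop terms: pvT x a j = Σ_{i=0..j} (x + a + i)
def pvT (x a : Int) : Nat → Int
  | 0 => x + a
  | j+1 => pvT x a j + (x + a + ((j : Int) + 1))

-- total of n terms starting at offset a
def pvTotal (x : Int) : Int → Nat → Int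
  | _, 0 => 0
  | a, n+1 => (x + a) + pvTotal x (a + 1) n

theorem pvT_shift (x a : Int) (j : Nat) : pvT x a (j+1) = (x + a) + pvT x (a+1) j := by
  induction j with
  | zero => simp [pvT]; ring
  | succ j ih =>
    show pvT x a (j+1) + (x + a + ((j:Int)+1+1)) = (x+a) + (pvT x (a+1) j + (x + (a+1) + ((j:Int)+1)))
    rw [ih]; ring

theorem pvTotal_eq (x : Int) (n : Nat) : ∀ a : Int, pvTotal x a (n+1) = pvT x a n := by
  induction n with
  | zero => intro a; simp [pvTotal, pvT]
  | succ n ih => intro a; show (x + a) + pvTotal x (a+1) (n+1) = pvT x a (n+1); rw [ih, pvT_shift]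

theorem pvT_step (x : Int) (hx : 0 ≤ x) (j : Nat) : pvT x 0 j ≤ pvT x 0 (j+1) := by
  show pvT x 0 j ≤ pvT x 0 j + (x + 0 + ((j : Int) + 1))
  have h1 : (0:Int) ≤ (j : Int) + 1 := by positivity
  omega

theorem pvT_mono (x : Int) (hx : 0 ≤ x) : ∀ {j j' : Nat}, j ≤ j' → pvT x 0 j ≤ pvT x 0 j' := by
  intro j j' h
  induction j' with
  | zero => have hj : j = 0 := by omega
            rw [hj]
  | succ n ih =>
    by_cases hj : j ≤ n
    · exact le_trans (ih hj) (pvT_step x hx n)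
    · have : j = n + 1 := by omega
      rw [this]

-- Source B's partial-sum formula equals pvT x 0 k
theorem altF_eq_pvT (x : Int) (k : Nat) :
    ((k : Int) + 1) * x + PySem.Int.floordiv ((k : Int) * ((k : Int) + 1)) 2 = pvT x 0 k := by
  induction k with
  | zero => simp [pvT, PySem.Int.floordiv]
  | succ k ih =>
    have hc : ∀ m : Nat, ((m:Int)) * ((m:Int)+1) = ((m * (m+1) : Nat) : Int) := by intro m; push_cast; ring
    have hf : ∀ m : Nat, PySem.Int.floordiv ((m:Int) * ((m:Int)+1)) 2 = ((m * (m+1) / 2 : Nat) : Int) := by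
      intro m; rw [hc m]; exact_mod_cast PySem.Int.floordiv_natCast (m * (m+1)) 2
    rw [hf] at ih ⊢
    have heven : ∃ t, k * (k+1) = 2 * t := by
      rcases Nat.even_mul_succ_self k with ⟨t, ht⟩; exact ⟨t, by omega⟩
    have hstep : (k+1) * (k+1+1) / 2 = k * (k+1) / 2 + (k+1) := by
      rcases heven with ⟨t, ht⟩
      have : (k+1) * (k+1+1) = k * (k+1) + 2 * (k+1) := by ring
      omega
    show ((k:Int)+1+1) * x + ((k+1) * (k+1+1) / 2 : Nat) = pvT x 0 k + (x + 0 + ((k:Int)+1))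
    rw [hstep, ← ih]; push_cast; ring

theorem pvT99 (x : Int) : pvT x 0 99 = 100 * x + 4950 := by
  have h := altF_eq_pvT x 99
  have hf : PySem.Int.floordiv (((99:Nat) : Int) * (((99:Nat) : Int) + 1)) 2 = 4950 := by
    norm_num [PySem.Int.floordiv_eq_ediv_of_pos]
  rw [hf] at h
  rw [← h]; push_cast; ring

-- the concrete range list as a mapped List.range'
def pvInts : Nat → Nat → List Int
  | _, 0 => []
  | a, n+1 => (a : Int) :: pvInts (a+1) n

theorem pyRange100 : PySem.List.pyRange 0 100 1 = pvInts 0 100 := by decide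

-- A's inner loop, no-break case
theorem inner_nobreak (x : Int) : ∀ (n a : Nat) (v : Int),
    (∀ j, j < n → v + pvT x a j ≤ 50) →
    loopbreakInner x (pvInts a n) v = v + pvTotal x a n := by
  intro n
  induction n with
  | zero => intro a v _; simp [pvInts, loopbreakInner, pvTotal]
  | succ n ih =>
    intro a v hle
    have h0 := hle 0 (Nat.succ_pos n)
    simp only [pvT] at h0
    show (if v + x + (a:Int) > 50 then v + x + a else loopbreakInner x (pvInts (a+1) n) (v + x + a)) = v + pvTotal x a (n+1)
    rw [if_neg (by omega)]
    have hrec : ∀ j, j < n → (v + x + (a:Int)) + pvT x (a+1) j ≤ 50 := by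
      intro j hj
      have := hle (j+1) (by omega)
      rw [pvT_shift] at this
      omega
    have := ih (a+1) (v + x + a) (by intro j hj; have := hrec j hj; push_cast at this ⊢; omega)
    rw [this]
    show v + x + (a:Int) + pvTotal x (↑(a+1)) n = v + ((x + a) + pvTotal x ((a:Int)+1) n)
    push_cast; ring

-- A's inner loop, break at step K
theorem inner_break (x : Int) : ∀ (K : Nat), ∀ (n a : Nat) (v : Int), K < n →
    (∀ j, j < K → v + pvT x a j ≤ 50) → v + pvT x a K > 50 →
    loopbreakInner x (pvInts a n) v = v + pvT x a K := by
  intro K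
  induction K with
  | zero =>
    intro n a v hn _ hgt
    obtain ⟨m, rfl⟩ : ∃ m, n = m + 1 := ⟨n - 1, by omega⟩
    show (if v + x + (a:Int) > 50 then v + x + a else loopbreakInner x (pvInts (a+1) m) (v + x + a)) = v + pvT x a 0
    simp only [pvT] at hgt
    rw [if_pos (by omega)]
    simp [pvT]; ring
  | succ K ih =>
    intro n a v hn hle hgt
    obtain ⟨m, rfl⟩ : ∃ m, n = m + 1 := ⟨n - 1, by omega⟩
    show (if v + x + (a:Int) > 50 then v + x + a else loopbreakInner x (pvInts (a+1) m) (v + x + a)) = v + pvT x a (K+1)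
    have h0 := hle 0 (Nat.succ_pos K)
    simp only [pvT] at h0
    rw [if_neg (by omega)]
    have hgt' : (v + x + (a:Int)) + pvT x (↑(a+1)) K > 50 := by
      rw [pvT_shift] at hgt; push_cast; omega
    have hle' : ∀ j, j < K → (v + x + (a:Int)) + pvT x (↑(a+1)) j ≤ 50 := by
      intro j hj
      have := hle (j+1) (by omega)
      rw [pvT_shift] at this; push_cast; omega
    have := ih m (a+1) (v + x + a) (by omega) hle' hgt'
    rw [this, pvT_shift]
    push_cast; ring

-- binary-search correctness: with a monotone threshold K inside [lo, hi] the search returns K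
theorem altSearch_correct (z x : Int) (K : Nat)
    (hiff : ∀ j : Nat, (z + ((j:Int) + 1) * x + PySem.Int.floordiv ((j:Int) * ((j:Int) + 1)) 2 > 50) ↔ K ≤ j) :
    ∀ (fuel lo hi : Nat), hi - lo ≤ fuel → lo ≤ K → K ≤ hi → altSearch z x lo hi = K := by
  intro fuel
  induction fuel with
  | zero =>
    intro lo hi hf hlo hhi
    rw [altSearch, dif_neg (by omega)]
    omega
  | succ fuel ih =>
    intro lo hi hf hlo hhi
    by_cases h : lo < hi
    · rw [altSearch, dif_pos h]
      simp only
      set mid := (lo + hi) / 2 with hmid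
      have hb1 : lo ≤ mid := by omega
      have hb2 : mid < hi := by omega
      by_cases hp : z + ((mid:Int) + 1) * x + PySem.Int.floordiv ((mid:Int) * ((mid:Int) + 1)) 2 > 50
      · rw [if_pos hp]
        exact ih lo mid (by omega) hlo ((hiff mid).mp hp)
      · rw [if_neg hp]
        have : ¬ K ≤ mid := fun hk => hp ((hiff mid).mpr hk)
        exact ih (mid+1) hi (by omega) (by omega) hhi
    · rw [altSearch, dif_neg h]; omega

-- the two inner computations agree for 0 ≤ x
theorem inner_eq (z x : Int) (hx : 0 ≤ x) :
    loopbreakInner x (pvInts 0 100) z =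
      (if z + (100 * x + 4950) > 50 then
        z + ((altSearch z x 0 99 : Int) + 1) * x +
          PySem.Int.floordiv ((altSearch z x 0 99 : Int) * ((altSearch z x 0 99 : Int) + 1)) 2
      else z + (100 * x + 4950)) := by
  by_cases hbig : z + (100 * x + 4950) > 50
  · rw [if_pos hbig]
    have hQ99 : z + pvT x 0 99 > 50 := by rw [pvT99]; exact hbig
    have hex : ∃ j, z + pvT x 0 j > 50 := ⟨99, hQ99⟩
    classical
    set K := Nat.find hex with hK
    have hKspec : z + pvT x 0 K > 50 := Nat.find_spec hex
    have hKmin : ∀ j, j < K → ¬ (z + pvT x 0 j > 50) := fun j hj => Nat.find_min hex hj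
    have hK99 : K ≤ 99 := Nat.find_le hQ99
    have hA := inner_break x K 100 0 z (by omega)
      (by intro j hj; have := hKmin j hj; push_cast; omega) (by push_cast; omega)
    have hcast : ((0:Nat):Int) = 0 := rfl
    rw [hcast] at hA
    rw [hA]
    have hiff : ∀ j : Nat, (z + ((j:Int) + 1) * x + PySem.Int.floordiv ((j:Int) * ((j:Int) + 1)) 2 > 50) ↔ K ≤ j := by
      intro j
      have he : z + (((j:Int) + 1) * x + PySem.Int.floordiv ((j:Int) * ((j:Int) + 1)) 2) = z + pvT x 0 j := by
        rw [altF_eq_pvT]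
      constructor
      · intro hgt
        by_contra hnk
        exact hKmin j (by omega) (by omega)
      · intro hkj
        have := pvT_mono x hx hkj
        omega
    have hs : altSearch z x 0 99 = K := altSearch_correct z x K hiff 99 0 99 (by omega) (by omega) hK99
    rw [hs]
    have := altF_eq_pvT x K
    omega
  · rw [if_neg hbig]
    have hQ99 : ¬ (z + pvT x 0 99 > 50) := by rw [pvT99]; exact hbig
    have hA := inner_nobreak x 100 0 z (by
      intro j hj
      have hm := pvT_mono x hx (show j ≤ 99 by omega)
      push_cast
      omega)
    have hcast : ((0:Nat):Int) = 0 := rfl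
    rw [hcast] at hA
    rw [hA, show (100:Nat) = 99 + 1 from rfl, pvTotal_eq, pvT99]

-- ===== VERDICT (by name: the statement is the Claim_ definition above) =====
theorem loopbreak_spec : Claim_equal_loopbreak := by
  intro d _
  unfold Spec_loopbreak loopbreak loopbreak_alt
  apply PySem.List.foldl_congr_mem
  intro acc x hmem
  have hx : 0 ≤ x := ((PySem.List.mem_pyRange_one).mp hmem).1
  simp only
  rw [pyRange100, inner_eq acc x hx]
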